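-- pv_equiv track=rewrite | github.com/AnonymousRepository6/EPR-POMO | EPR/EPR-Sym-POMO/Sym-NCO-POMO/TSP/LKH.py | generate_substrings_with_reverse
-- ===== SOURCE A (Python) =====
-- def generate_substrings_with_reverse(solution, K):
--     substrings = []
--     start = 0
--
--     for i in range(len(solution)):
--         if solution[i] == 0:
--             if start < i:
--                 segment = solution[start:i]
--                 for j in range(len(segment) - K + 1):
--                     subseq = segment[j:j+K]
--                     substrings.append(subseq)
--                     substrings.append(subseq[::-1])
--             start = i + 1
--
--     # 处理末尾不是 0 的情况
--     if start < len(solution):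
--         segment = solution[start:]
--         for j in range(len(segment) - K + 1):
--             subseq = segment[j:j+K]
--             substrings.append(subseq)
--             substrings.append(subseq[::-1])
--
--     return substrings
-- ===== SOURCE B (Python) =====
-- def generate_substrings_with_reverse(solution, K):
--     substrings = []
--     for i in range(len(solution) - K + 1):
--         window = solution[i:i+K]
--         if 0 not in window:
--             substrings.append(window)
--             substrings.append(window[::-1])
--     return substrings
-- ===== Notes on version B (the rewrite author's own statement) =====
-- stated objective: simpler
-- what changed: B never splits the list into segments: it slides a single window of length K over the whole list and emits the window and its reverse exactly when the window contains no zero, replacing A's zero-splitting, start-index bookkeeping and duplicated tail block by one uniform loop with a membership test.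
-- outside the precondition, e.g. on generate_substrings_with_reverse([0, 1], 0): A returns [[], [], [], []], B returns [[], [], [], [], [], []]; on generate_substrings_with_reverse([], 0): A returns [], B returns [[], []]
import Mathlib
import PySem

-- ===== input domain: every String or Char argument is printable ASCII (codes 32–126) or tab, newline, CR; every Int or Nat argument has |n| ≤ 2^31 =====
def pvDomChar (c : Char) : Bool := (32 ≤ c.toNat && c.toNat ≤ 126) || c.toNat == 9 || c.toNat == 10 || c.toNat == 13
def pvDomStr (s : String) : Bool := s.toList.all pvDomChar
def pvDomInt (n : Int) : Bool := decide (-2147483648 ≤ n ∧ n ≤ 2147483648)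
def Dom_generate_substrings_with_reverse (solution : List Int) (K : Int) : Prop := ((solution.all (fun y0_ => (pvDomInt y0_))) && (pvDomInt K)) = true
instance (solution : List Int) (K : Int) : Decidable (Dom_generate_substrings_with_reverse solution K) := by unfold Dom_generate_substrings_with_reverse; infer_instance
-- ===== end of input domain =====

-- B replaces A's zero-splitting scan (segments + per-segment window loops + duplicated tail block)
-- by one sliding window over the whole list that is emitted iff it contains no zero; same return
-- value for K ≥ 1, no speed claim.

-- ===== PORT A =====
-- A's inner emission loop: for j in range(len(segment)-K+1): append segment[j:j+K] and its reverse
def pvEmitA (segment : List Int) (K : Int) (substrings : List (List Int)) : List (List Int) :=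
  (PySem.List.pyRange 0 (PySem.List.len segment - K + 1) 1).foldl
    (fun subs j =>
      let subseq := PySem.List.slice segment (some j) (some (j + K))
      (subs ++ [subseq]) ++ [((PySem.List.slice? subseq none none (-1)).getD [])]) substrings

def generate_substrings_with_reverse (solution : List Int) (K : Int) : List (List Int) :=
  let n := PySem.List.len solution
  let st := (PySem.List.pyRange 0 n 1).foldl
    (fun (st : List (List Int) × Int) i =>
      if PySem.List.pyGetD solution i 0 = 0 then
        (if st.2 < i then
          (pvEmitA (PySem.List.slice solution (some st.2) (some i)) K st.1, i + 1)
        else (st.1, i + 1))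
      else st) ([], 0)
  if st.2 < n then pvEmitA (PySem.List.slice solution (some st.2) (some n)) K st.1
  else st.1

-- ===== PORT B =====
-- one sliding window over the whole list: emit window and reverse iff it contains no zero
def generate_substrings_with_reverse_alt (solution : List Int) (K : Int) : List (List Int) :=
  (PySem.List.pyRange 0 (PySem.List.len solution - K + 1) 1).foldl
    (fun subs i =>
      let window := PySem.List.slice solution (some i) (some (i + K))
      if (0 : Int) ∈ window then subs
      else (subs ++ [window]) ++ [((PySem.List.slice? window none none (-1)).getD [])]) []

-- ===== PRECONDITION & SPEC =====
-- Pre_ excludes nonpositive K on lists that are empty or contain a zero: the window length is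
-- degenerate there and A's number of emitted degenerate slices — one pair per position of
-- range(len(segment)-K+1), counted per zero-split segment — is an accidental artefact of its
-- arithmetic that no caller would specify; B emits a different number of such slices there.
def Pre_generate_substrings_with_reverse (solution : List Int) (K : Int) : Prop :=
  1 ≤ K ∨ (solution ≠ [] ∧ (0 : Int) ∉ solution)
instance (solution : List Int) (K : Int) : Decidable (Pre_generate_substrings_with_reverse solution K) := by unfold Pre_generate_substrings_with_reverse; infer_instance

def pvWitness_generate_substrings_with_reverse : List Int × Int := ([1, 2, 0, 3, 4, 5], 2)

def Spec_generate_substrings_with_reverse (solution : List Int) (K : Int) (out : List (List Int)) : Prop := out = generate_substrings_with_reverse_alt solution K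
instance (solution : List Int) (K : Int) (out : List (List Int)) : Decidable (Spec_generate_substrings_with_reverse solution K out) := by unfold Spec_generate_substrings_with_reverse; infer_instance

-- ===== CLAIM (what is proved, stated in full; the proofs are below) =====
def Claim_equal_generate_substrings_with_reverse : Prop := ∀ (solution : List Int) (K : Int), Dom_generate_substrings_with_reverse solution K → Pre_generate_substrings_with_reverse solution K → Spec_generate_substrings_with_reverse solution K (generate_substrings_with_reverse solution K)

-- ===== LEMMAS AND PROOFS =====

-- canonical forms (Nat window size k = K.toNat, k ≥ 1)
def pvWin (l : List Int) (k i : Nat) : List Int := (l.drop i).take k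

-- B's algorithm, canonically
def pvSlide (l : List Int) (k : Nat) : List (List Int) :=
  (List.range (l.length + 1 - k)).flatMap
    (fun i => if (0 : Int) ∈ pvWin l k i then [] else [pvWin l k i, (pvWin l k i).reverse])

-- A's per-segment emission, canonically
def pvPairs (seg : List Int) (k : Nat) : List (List Int) :=
  (List.range (seg.length + 1 - k)).flatMap (fun j => [pvWin seg k j, (pvWin seg k j).reverse])

-- A's unconditional window loop (value of pvEmitA on [])
def pvWindows (seg : List Int) (K : Int) : List (List Int) :=
  (PySem.List.pyRange 0 (PySem.List.len seg - K + 1) 1).foldl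
    (fun res j =>
      let w := PySem.List.slice seg (some j) (some (j + K))
      (res ++ [w]) ++ [((PySem.List.slice? w none none (-1)).getD [])]) []

-- the maximal non-zero runs of the list (proof-side; snoc-fold shape matching A's scan)
def pvStep (st : List (List Int) × List Int) (x : Int) : List (List Int) × List Int :=
  if x = 0 then (if st.2 ≠ [] then (st.1 ++ [st.2], []) else st)
  else (st.1, st.2 ++ [x])

def pvRunsState (p : List Int) : List (List Int) × List Int := p.foldl pvStep ([], [])

def pvFinish (st : List (List Int) × List Int) : List (List Int) :=
  st.1 ++ (if st.2 ≠ [] then [st.2] else [])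

def pvRuns (solution : List Int) : List (List Int) := pvFinish (pvRunsState solution)

theorem pvRunsState_append (p : List Int) (x : Int) :
    pvRunsState (p ++ [x]) =
      (if x = 0 then
        (if (pvRunsState p).2 ≠ [] then ((pvRunsState p).1 ++ [(pvRunsState p).2], [])
         else pvRunsState p)
       else ((pvRunsState p).1, (pvRunsState p).2 ++ [x])) := by
  simp [pvRunsState, pvStep, List.foldl_append]

-- a fold that only appends to its accumulator factors through []
theorem pvFoldl_append_pair (l : List Int) (g h : Int → List Int) :
    ∀ a : List (List Int),
      l.foldl (fun acc j => (acc ++ [g j]) ++ [h j]) a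
        = a ++ l.foldl (fun acc j => (acc ++ [g j]) ++ [h j]) [] := by
  induction l with
  | nil => intro a; simp
  | cons x t ih =>
    intro a
    simp only [List.foldl_cons]
    rw [ih ((a ++ [g x]) ++ [h x]), ih (([] ++ [g x]) ++ [h x])]
    simp

theorem pvEmitA_eq (seg : List Int) (K : Int) (acc : List (List Int)) :
    pvEmitA seg K acc = acc ++ pvWindows seg K := by
  unfold pvEmitA pvWindows
  exact pvFoldl_append_pair (PySem.List.pyRange 0 (PySem.List.len seg - K + 1) 1)
      (fun j => PySem.List.slice seg (some j) (some (j + K)))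
      (fun j => (PySem.List.slice? (PySem.List.slice seg (some j) (some (j + K))) none none (-1)).getD [])
      acc

def pvEmitAll (segs : List (List Int)) (K : Int) : List (List Int) :=
  segs.foldl (fun out seg => out ++ pvWindows seg K) []

theorem pvEmitAll_append (segs : List (List Int)) (seg : List Int) (K : Int) :
    pvEmitAll (segs ++ [seg]) K = pvEmitAll segs K ++ pvWindows seg K := by
  simp [pvEmitAll, List.foldl_append]

-- main invariant for A's indexed scan
theorem pvInv (solution : List Int) (K : Int) :
    ∀ m : Nat, m ≤ solution.length →
      ((PySem.List.pyRange 0 (m : Int) 1).foldl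
        (fun (st : List (List Int) × Int) i =>
          if PySem.List.pyGetD solution i 0 = 0 then
            (if st.2 < i then
              (pvEmitA (PySem.List.slice solution (some st.2) (some i)) K st.1, i + 1)
            else (st.1, i + 1))
          else st) ([], 0))
        = (pvEmitAll (pvRunsState (solution.take m)).1 K,
           (m : Int) - ((pvRunsState (solution.take m)).2.length : Int))
      ∧ (pvRunsState (solution.take m)).2
          = (solution.take m).drop (m - (pvRunsState (solution.take m)).2.length)
      ∧ (pvRunsState (solution.take m)).2.length ≤ m := by
  intro m
  induction m with
  | zero => intro _; simp [pvRunsState, pvEmitAll]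
  | succ m ih =>
    intro hm
    have hmlt : m < solution.length := by omega
    obtain ⟨ih1, ih2, ih3⟩ := ih (by omega)
    have htake : solution.take (m + 1) = solution.take m ++ [solution[m]] := by
      rw [List.take_add_one]
      simp [List.getElem?_eq_getElem hmlt]
    have hrange : PySem.List.pyRange 0 ((m + 1 : Nat) : Int) 1
        = PySem.List.pyRange 0 (m : Int) 1 ++ [(m : Int)] := by
      push_cast
      exact PySem.List.pyRange_one_succ_right (by positivity)
    have hget : PySem.List.pyGetD solution ((m : Nat) : Int) 0 = solution[m] := by
      rw [PySem.List.pyGetD_natCast]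
      simp [List.getD, List.getElem?_eq_getElem hmlt]
    set r := (pvRunsState (solution.take m)).2 with hr
    set segs := (pvRunsState (solution.take m)).1 with hsegs
    have hstep := pvRunsState_append (solution.take m) solution[m]
    rw [← htake, ← hr, ← hsegs] at hstep
    rw [hrange, List.foldl_append, ih1, List.foldl_cons, List.foldl_nil, hget]
    dsimp only
    by_cases hz : solution[m] = 0
    · rw [if_pos hz] at hstep ⊢
      by_cases hr0 : r = []
      · have hcond : ¬ (r ≠ []) := by simp [hr0]
        rw [if_neg hcond] at hstep
        have hnlt : ¬ ((m : Int) - (r.length : Int) < (m : Int)) := by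
          rw [hr0]; simp
        rw [if_neg hnlt]
        refine ⟨?_, ?_, ?_⟩
        · rw [hstep, ← hsegs, ← hr, hr0]
          simp only [List.length_nil, Nat.cast_zero]
          rw [Prod.mk.injEq]
          exact ⟨rfl, by push_cast; ring⟩
        · rw [hstep, ← hr, hr0]
          symm
          rw [List.drop_eq_nil_iff]
          simp
        · rw [hstep, ← hr, hr0]
          try simp
      · rw [if_pos hr0] at hstep
        have hrpos : 0 < r.length := List.length_pos_iff.mpr hr0
        have hlt : (m : Int) - (r.length : Int) < (m : Int) := by omega
        have hslice : PySem.List.slice solution (some ((m : Int) - (r.length : Int)))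
            (some (m : Int)) = r := by
          have hcast : (m : Int) - (r.length : Int) = ((m - r.length : Nat) : Int) := by omega
          rw [hcast, PySem.List.slice_natCast]
          conv_rhs => rw [ih2, List.drop_take]
        rw [if_pos hlt, hslice, pvEmitA_eq, ← pvEmitAll_append]
        refine ⟨?_, ?_, ?_⟩
        · rw [hstep]
          dsimp only
          rw [Prod.mk.injEq]
          refine ⟨rfl, ?_⟩
          simp only [List.length_nil, Nat.cast_zero]
          push_cast
          ring
        · rw [hstep]
          dsimp only
          symm
          rw [List.drop_eq_nil_iff]
          simp [List.length_take]
        · rw [hstep]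
          dsimp only
          simp
    · rw [if_neg hz] at hstep ⊢
      refine ⟨?_, ?_, ?_⟩
      · rw [hstep]
        dsimp only
        rw [Prod.mk.injEq]
        refine ⟨rfl, ?_⟩
        simp only [List.length_append, List.length_cons, List.length_nil]
        push_cast
        ring
      · rw [hstep]
        dsimp only
        rw [htake]
        have hidx : (m + 1) - (r ++ [solution[m]]).length = m - r.length := by
          simp only [List.length_append, List.length_cons, List.length_nil]
          omega
        rw [hidx, List.drop_append_of_le_length (by simp [List.length_take]; omega), ← ih2]
      · rw [hstep]
        dsimp only
        simp only [List.length_append, List.length_cons, List.length_nil]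
        omega

-- A's result is the per-run emission, in run order
theorem pvA_eq_runs (solution : List Int) (K : Int) :
    generate_substrings_with_reverse solution K
      = (pvRuns solution).flatMap (fun seg => pvWindows seg K) := by
  obtain ⟨h1, h2, h3⟩ := pvInv solution K solution.length le_rfl
  rw [List.take_length] at h1 h2
  unfold generate_substrings_with_reverse pvRuns pvFinish
  simp only [PySem.List.len_eq]
  rw [h1]
  set r := (pvRunsState solution).2 with hr
  set segs := (pvRunsState solution).1 with hsegs
  by_cases hr0 : r = []
  · rw [if_neg (by rw [hr0]; simp), if_neg (by simp [hr0])]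
    simp [pvEmitAll, List.flatMap_def]
  · have hrpos : 0 < r.length := List.length_pos_iff.mpr hr0
    have hlen : r.length ≤ solution.length := by
      rw [List.take_length] at h3; exact h3
    have hlt : (solution.length : Int) - (r.length : Int) < (solution.length : Int) := by omega
    have hslice : PySem.List.slice solution
        (some ((solution.length : Int) - (r.length : Int)))
        (some (solution.length : Int)) = r := by
      have hcast : (solution.length : Int) - (r.length : Int)
          = ((solution.length - r.length : Nat) : Int) := by omega
      rw [hcast, PySem.List.slice_natCast,
        show solution.length - (solution.length - r.length) = r.length from by omega, ← h2]
      exact List.take_length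
    rw [if_pos hlt, if_pos hr0, hslice, pvEmitA_eq]
    simp [pvEmitAll, List.flatMap_def]

-- ----- bridges from the ports' pyRange/slice shapes to the canonical Nat forms -----

theorem pvWindows_eq_pvPairs (seg : List Int) (K : Int) (hK : 1 ≤ K) :
    pvWindows seg K = pvPairs seg K.toNat := by
  unfold pvWindows pvPairs
  have hfun : (fun (res : List (List Int)) (j : Int) =>
      (res ++ [PySem.List.slice seg (some j) (some (j + K))])
        ++ [((PySem.List.slice? (PySem.List.slice seg (some j) (some (j + K))) none none (-1)).getD [])])
      = fun res j => res ++ [PySem.List.slice seg (some j) (some (j + K)),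
          (PySem.List.slice seg (some j) (some (j + K))).reverse] := by
    funext res j
    simp [PySem.List.slice?_none_none_neg_one]
  simp only [hfun, PySem.List.foldl_append_eq_flatMap, List.nil_append]
  rw [PySem.List.pyRange_one, List.flatMap_map]
  have hb : ((PySem.List.len seg - K + 1) - 0).toNat = seg.length + 1 - K.toNat := by
    simp only [PySem.List.len_eq]
    omega
  rw [hb]
  apply List.flatMap_congr
  intro i _
  have hcast : (0 : Int) + (i : Int) + K = ((i : Int)) + ((K.toNat : Nat) : Int) := by omega
  have h0 : (0 : Int) + (i : Int) = ((i : Nat) : Int) := by omega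
  rw [h0] at hcast ⊢
  rw [hcast, PySem.List.slice_natCast_add]
  rfl

theorem pvAlt_eq_pvSlide (solution : List Int) (K : Int) (hK : 1 ≤ K) :
    generate_substrings_with_reverse_alt solution K = pvSlide solution K.toNat := by
  unfold generate_substrings_with_reverse_alt pvSlide
  have hfun : (fun (subs : List (List Int)) (i : Int) =>
      if (0 : Int) ∈ PySem.List.slice solution (some i) (some (i + K)) then subs
      else (subs ++ [PySem.List.slice solution (some i) (some (i + K))])
        ++ [((PySem.List.slice? (PySem.List.slice solution (some i) (some (i + K))) none none (-1)).getD [])])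
      = fun subs i => subs ++
          (if (0 : Int) ∈ PySem.List.slice solution (some i) (some (i + K)) then []
           else [PySem.List.slice solution (some i) (some (i + K)),
                 (PySem.List.slice solution (some i) (some (i + K))).reverse]) := by
    funext subs i
    split_ifs with h
    · simp
    · simp [PySem.List.slice?_none_none_neg_one]
  simp only [hfun, PySem.List.foldl_append_eq_flatMap, List.nil_append]
  rw [PySem.List.pyRange_one, List.flatMap_map]
  have hb : ((PySem.List.len solution - K + 1) - 0).toNat = solution.length + 1 - K.toNat := by
    simp only [PySem.List.len_eq]
    omega
  rw [hb]
  apply List.flatMap_congr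
  intro i _
  have h0 : (0 : Int) + (i : Int) = ((i : Nat) : Int) := by omega
  have hcast : ((i : Nat) : Int) + K = ((i : Nat) : Int) + ((K.toNat : Nat) : Int) := by omega
  rw [h0, hcast, PySem.List.slice_natCast_add]
  rfl

-- ----- head-recursion characterisation of pvRuns -----

theorem pvRunsState_factor (l : List Int) :
    ∀ segs run, l.foldl pvStep (segs, run)
      = (segs ++ (l.foldl pvStep ([], run)).1, (l.foldl pvStep ([], run)).2) := by
  induction l with
  | nil => intro segs run; simp
  | cons x t ih =>
    intro segs run
    simp only [List.foldl_cons]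
    by_cases hx : x = 0
    · by_cases hr : run = []
      · have h1 : pvStep (segs, run) x = (segs, run) := by simp [pvStep, hx, hr]
        have h2 : pvStep (([] : List (List Int)), run) x = ([], run) := by
          simp [pvStep, hx, hr]
        rw [h1, h2]
        exact ih segs run
      · have h1 : pvStep (segs, run) x = (segs ++ [run], []) := by simp [pvStep, hx, hr]
        have h2 : pvStep (([] : List (List Int)), run) x = ([run], []) := by
          simp [pvStep, hx, hr]
        rw [h1, h2, ih (segs ++ [run]) [], ih [run] []]
        simp
    · have h1 : pvStep (segs, run) x = (segs, run ++ [x]) := by simp [pvStep, hx]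
      have h2 : pvStep (([] : List (List Int)), run) x = ([], run ++ [x]) := by
        simp [pvStep, hx]
      rw [h1, h2]
      exact ih segs (run ++ [x])

theorem pvRuns_nil : pvRuns [] = [] := by decide

theorem pvRuns_cons_zero (t : List Int) : pvRuns (0 :: t) = pvRuns t := by
  have h : pvStep (([] : List (List Int)), ([] : List Int)) 0 = ([], []) := by
    simp [pvStep]
  simp only [pvRuns, pvRunsState, List.foldl_cons, h]

theorem pvL2 (l : List Int) :
    ∀ run, run ≠ [] →
      pvFinish (l.foldl pvStep ([], run))
      = (run ++ l.takeWhile (· ≠ 0)) :: pvRuns (l.dropWhile (· ≠ 0)) := by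
  induction l with
  | nil => intro run hrun; simp [pvFinish, pvRuns, pvRunsState, hrun]
  | cons x t ih =>
    intro run hrun
    by_cases hx : x = 0
    · subst hx
      have h2 : pvStep (([] : List (List Int)), run) 0 = ([run], []) := by
        simp [pvStep, hrun]
      rw [List.foldl_cons, h2, pvRunsState_factor t [run] []]
      have ht : List.takeWhile (· ≠ 0) ((0 : Int) :: t) = [] := by simp
      have hd : List.dropWhile (· ≠ 0) ((0 : Int) :: t) = 0 :: t := by simp
      rw [ht, hd, pvRuns_cons_zero]
      simp [pvFinish, pvRuns, pvRunsState]
    · have h2 : pvStep (([] : List (List Int)), run) x = ([], run ++ [x]) := by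
        simp [pvStep, hx]
      rw [List.foldl_cons, h2, ih (run ++ [x]) (by simp)]
      have ht : List.takeWhile (· ≠ 0) (x :: t) = x :: List.takeWhile (· ≠ 0) t := by
        simp [hx]
      have hd : List.dropWhile (· ≠ 0) (x :: t) = List.dropWhile (· ≠ 0) t := by
        simp [hx]
      rw [ht, hd]
      simp

theorem pvRuns_cons_nonzero (a : Int) (t : List Int) (ha : a ≠ 0) :
    pvRuns (a :: t) = (a :: t.takeWhile (· ≠ 0)) :: pvRuns (t.dropWhile (· ≠ 0)) := by
  have h2 : pvStep (([] : List (List Int)), ([] : List Int)) a = ([], [a]) := by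
    simp [pvStep, ha]
  have h0 : pvRuns (a :: t) = pvFinish (t.foldl pvStep ([], [a])) := by
    rw [pvRuns, pvRunsState, List.foldl_cons, h2]
  rw [h0, pvL2 t [a] (by simp)]
  simp

-- ----- sliding-window ↔ per-run emission -----

theorem pvSlide_cons (a : Int) (m : List Int) (k : Nat) (_hk : 1 ≤ k) :
    pvSlide (a :: m) k
      = (if k ≤ m.length + 1 then
          (if (0 : Int) ∈ (a :: m).take k then []
           else [(a :: m).take k, ((a :: m).take k).reverse])
         else []) ++ pvSlide m k := by
  unfold pvSlide
  by_cases h : k ≤ m.length + 1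
  · rw [if_pos h]
    have hlen : (a :: m).length + 1 - k = (m.length + 1 - k) + 1 := by
      simp only [List.length_cons]; omega
    rw [hlen, List.range_succ_eq_map, List.flatMap_cons, List.flatMap_map]
    have hwin0 : pvWin (a :: m) k 0 = (a :: m).take k := by simp [pvWin]
    rw [hwin0]
    congr 1
  · rw [if_neg h]
    have h1 : (a :: m).length + 1 - k = 0 := by simp only [List.length_cons]; omega
    have h2 : m.length + 1 - k = 0 := by omega
    rw [h1, h2]
    simp

theorem pvPairs_cons (a : Int) (r : List Int) (k : Nat) (_hk : 1 ≤ k) :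
    pvPairs (a :: r) k
      = (if k ≤ r.length + 1 then [(a :: r).take k, ((a :: r).take k).reverse] else [])
        ++ pvPairs r k := by
  unfold pvPairs
  by_cases h : k ≤ r.length + 1
  · rw [if_pos h]
    have hlen : (a :: r).length + 1 - k = (r.length + 1 - k) + 1 := by
      simp only [List.length_cons]; omega
    rw [hlen, List.range_succ_eq_map, List.flatMap_cons, List.flatMap_map]
    have hwin0 : pvWin (a :: r) k 0 = (a :: r).take k := by simp [pvWin]
    rw [hwin0]
    congr 1
  · rw [if_neg h]
    have h1 : (a :: r).length + 1 - k = 0 := by simp only [List.length_cons]; omega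
    have h2 : r.length + 1 - k = 0 := by omega
    rw [h1, h2]
    simp

theorem pvSlide_split (r d : List Int) (k : Nat) (hk : 1 ≤ k)
    (hr : ∀ x ∈ r, x ≠ 0) (hd : d = [] ∨ ∃ d', d = 0 :: d') :
    pvSlide (r ++ d) k = pvPairs r k ++ pvSlide d k := by
  induction r with
  | nil =>
    simp [pvPairs, Nat.sub_eq_zero_of_le hk]
  | cons a r ih =>
    have ha : a ≠ 0 := hr a (by simp)
    have hr' : ∀ x ∈ r, x ≠ 0 := fun x hx => hr x (by simp [hx])
    rw [List.cons_append, pvSlide_cons a (r ++ d) k hk, ih hr',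
        pvPairs_cons a r k hk, List.append_assoc]
    congr 1
    by_cases h1 : k ≤ r.length + 1
    · have hg : k ≤ (r ++ d).length + 1 := by simp only [List.length_append]; omega
      rw [if_pos h1, if_pos hg]
      have htk : (a :: (r ++ d)).take k = (a :: r).take k := by
        rw [show a :: (r ++ d) = (a :: r) ++ d from rfl]
        exact List.take_append_of_le_length (by simp only [List.length_cons]; omega)
      rw [htk]
      have hmem : (0 : Int) ∉ (a :: r).take k := by
        intro hc
        have := List.mem_of_mem_take hc
        rcases List.mem_cons.mp this with h | h
        · exact ha h.symm
        · exact hr' 0 h rfl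
      rw [if_neg hmem]
    · rw [if_neg h1]
      rcases hd with hd | ⟨d', hd⟩
      · subst hd
        rw [if_neg (by simp only [List.append_nil]; omega)]
      · subst hd
        by_cases h2 : k ≤ (r ++ 0 :: d').length + 1
        · rw [if_pos h2]
          have hmem : (0 : Int) ∈ (a :: (r ++ 0 :: d')).take k := by
            rw [show a :: (r ++ 0 :: d') = (a :: r) ++ 0 :: d' from rfl,
                List.take_append]
            have hpos : 1 ≤ k - (a :: r).length := by simp only [List.length_cons]; omega
            obtain ⟨j, hj⟩ : ∃ j, k - (a :: r).length = j + 1 :=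
              ⟨k - (a :: r).length - 1, by omega⟩
            rw [hj, List.take_succ_cons]
            simp
          rw [if_pos hmem]
        · rw [if_neg h2]

theorem pvSlide_eq_runs_aux (n : Nat) :
    ∀ l : List Int, l.length ≤ n → ∀ k : Nat, 1 ≤ k →
      pvSlide l k = (pvRuns l).flatMap (fun seg => pvPairs seg k) := by
  induction n with
  | zero =>
    intro l hl k hk
    have : l = [] := List.eq_nil_of_length_eq_zero (by omega)
    subst this
    simp [pvSlide, pvRuns_nil, Nat.sub_eq_zero_of_le hk]
  | succ n ih =>
    intro l hl k hk
    match l with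
    | [] => simp [pvSlide, pvRuns_nil, Nat.sub_eq_zero_of_le hk]
    | x :: t =>
      by_cases hx : x = 0
      · subst hx
        rw [pvRuns_cons_zero, pvSlide_cons 0 t k hk]
        have hmem : (0 : Int) ∈ ((0 : Int) :: t).take k := by
          obtain ⟨k', hk'⟩ : ∃ k', k = k' + 1 := ⟨k - 1, by omega⟩
          rw [hk', List.take_succ_cons]
          simp
        rw [if_pos hmem]
        have := ih t (by simp only [List.length_cons] at hl; omega) k hk
        simp only [this]
        split <;> simp
      · rw [pvRuns_cons_nonzero x t hx]
        have hsplit : x :: t = (x :: t.takeWhile (· ≠ 0)) ++ t.dropWhile (· ≠ 0) := by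
          rw [List.cons_append, List.takeWhile_append_dropWhile]
        rw [hsplit, pvSlide_split (x :: t.takeWhile (· ≠ 0)) (t.dropWhile (· ≠ 0)) k hk
            ?_ ?_, List.flatMap_cons]
        · congr 1
          apply ih (t.dropWhile (· ≠ 0)) ?_ k hk
          have := List.length_dropWhile_le (fun y : Int => decide (y ≠ 0)) t
          simp only [List.length_cons] at hl
          omega
        · intro y hy
          rcases List.mem_cons.mp hy with h | h
          · subst h; exact hx
          · have := List.mem_takeWhile_imp h
            simpa using this
        · cases hdw : t.dropWhile (· ≠ 0) with
          | nil => exact Or.inl rfl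
          | cons y ys =>
            right
            refine ⟨ys, ?_⟩
            have hne : List.dropWhile (fun x : Int => decide (x ≠ 0)) t ≠ [] := by
              rw [hdw]; simp
            have h2 := List.head_dropWhile_not (fun x : Int => decide (x ≠ 0)) hne
            have h3 : (List.dropWhile (fun x : Int => decide (x ≠ 0)) t).head hne = y := by
              simp only [hdw, List.head_cons]
            rw [h3] at h2
            have : y = 0 := by simpa using h2
            rw [this]

theorem pvSlide_eq_runs (l : List Int) (k : Nat) (hk : 1 ≤ k) :
    pvSlide l k = (pvRuns l).flatMap (fun seg => pvPairs seg k) :=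
  pvSlide_eq_runs_aux l.length l le_rfl k hk

-- a non-empty list without zeros is a single run
theorem pvRuns_nozero (l : List Int) (hl : l ≠ []) (h0 : ∀ x ∈ l, x ≠ 0) :
    pvRuns l = [l] := by
  match l with
  | [] => exact absurd rfl hl
  | a :: t =>
    have ha : a ≠ 0 := h0 a (by simp)
    rw [pvRuns_cons_nonzero a t ha]
    have ht : List.takeWhile (· ≠ 0) t = t := by
      rw [List.takeWhile_eq_self_iff]
      intro x hx
      simpa using h0 x (by simp [hx])
    have hd : List.dropWhile (· ≠ 0) t = [] := by
      rw [List.dropWhile_eq_nil_iff]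
      intro x hx
      simpa using h0 x (by simp [hx])
    rw [ht, hd, pvRuns_nil]

-- on a zero-free non-empty list the two ports run the very same loop (any K):
-- A's single segment is the whole list and B's membership filter never fires
theorem pvNoZero_case (solution : List Int) (K : Int) (hl : solution ≠ [])
    (h0 : (0 : Int) ∉ solution) :
    generate_substrings_with_reverse solution K
      = generate_substrings_with_reverse_alt solution K := by
  rw [pvA_eq_runs, pvRuns_nozero solution hl (fun x hx he => h0 (he ▸ hx))]
  simp only [List.flatMap_cons, List.flatMap_nil, List.append_nil]
  unfold pvWindows generate_substrings_with_reverse_alt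
  have hfunA : (fun (res : List (List Int)) (j : Int) =>
      (res ++ [PySem.List.slice solution (some j) (some (j + K))])
        ++ [((PySem.List.slice? (PySem.List.slice solution (some j) (some (j + K))) none none (-1)).getD [])])
      = fun res j => res ++ [PySem.List.slice solution (some j) (some (j + K)),
          (PySem.List.slice solution (some j) (some (j + K))).reverse] := by
    funext res j
    simp [PySem.List.slice?_none_none_neg_one]
  have hfunB : (fun (subs : List (List Int)) (i : Int) =>
      if (0 : Int) ∈ PySem.List.slice solution (some i) (some (i + K)) then subs
      else (subs ++ [PySem.List.slice solution (some i) (some (i + K))])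
        ++ [((PySem.List.slice? (PySem.List.slice solution (some i) (some (i + K))) none none (-1)).getD [])])
      = fun subs i => subs ++ [PySem.List.slice solution (some i) (some (i + K)),
          (PySem.List.slice solution (some i) (some (i + K))).reverse] := by
    funext subs i
    have hnm : (0 : Int) ∉ PySem.List.slice solution (some i) (some (i + K)) :=
      fun hc => h0 (PySem.List.mem_of_mem_slice solution (some i) (some (i + K)) hc)
    rw [if_neg hnm]
    simp [PySem.List.slice?_none_none_neg_one]
  rw [hfunA, hfunB]

-- ===== VERDICT (by name: the statement is the Claim_ definition above) =====
theorem generate_substrings_with_reverse_spec : Claim_equal_generate_substrings_with_reverse := by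
  intro solution K _ hK
  unfold Pre_generate_substrings_with_reverse at hK
  unfold Spec_generate_substrings_with_reverse
  rcases hK with hK | ⟨hl, h0⟩
  · rw [pvA_eq_runs, pvAlt_eq_pvSlide solution K hK, pvSlide_eq_runs solution K.toNat (by omega)]
    exact List.flatMap_congr (fun seg _ => pvWindows_eq_pvPairs seg K hK)
  · exact pvNoZero_case solution K hl h0
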